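-- pv_equiv track=rewrite | github.com/Jaumzinho109/codewars | spacey.py | spacey
-- ===== SOURCE A (Python) =====
-- def spacey(array):
--     pronto = []
--     novo = ''
--     for k, v in enumerate(array):
--         if k == 0:
--             pronto.append(v)
--         else:
--             novo = pronto[k - 1] + v
--             pronto.append(novo)
--     return pronto
-- ===== SOURCE B (Python) =====
-- def spacey(array):
--     return [''.join(array[:i + 1]) for i in range(len(array))]
-- ===== Notes on version B (the rewrite author's own statement) =====
-- stated objective: alternative
-- what changed: Replaces A's stateful enumerate loop (k==0 guard, pronto[k-1] back-reference, append) with a comprehension that recomputes each prefix independently by joining the slice array[:i+1]; it trades the incremental back-reference for direct prefix joins.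
import Mathlib
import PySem

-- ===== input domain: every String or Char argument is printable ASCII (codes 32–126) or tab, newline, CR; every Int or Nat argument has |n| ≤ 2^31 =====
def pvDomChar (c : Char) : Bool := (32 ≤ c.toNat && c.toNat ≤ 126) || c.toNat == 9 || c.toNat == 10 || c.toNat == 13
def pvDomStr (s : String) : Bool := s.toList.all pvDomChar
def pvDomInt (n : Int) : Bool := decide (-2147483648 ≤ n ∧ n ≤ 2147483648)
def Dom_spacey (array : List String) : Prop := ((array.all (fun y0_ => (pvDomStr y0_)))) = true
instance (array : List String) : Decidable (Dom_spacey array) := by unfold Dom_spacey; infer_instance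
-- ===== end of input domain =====

-- B replaces A's stateful enumerate loop (k==0 guard, pronto[k-1] back-reference)
-- with a comprehension joining each slice array[:i+1] independently: an alternative
-- decomposition of the same task, not claimed faster.

-- ===== PORT A =====
-- one loop step: k == 0 appends v; else novo = pronto[k-1] + v, append novo.
-- pronto[k-1] is always in range (pronto has k elements when index k is processed),
-- so the 'none' (IndexError) case of pyGet? is unreachable; it keeps the state unchanged.
def spaceyStep (st : List String × String) (kv : Int × String) : List String × String :=
  if kv.1 = 0 then (st.1 ++ [kv.2], st.2)
  else
    match PySem.List.pyGet? st.1 (kv.1 - 1) with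
    | some prev => (st.1 ++ [prev ++ kv.2], prev ++ kv.2)
    | none => st

def spacey (array : List String) : List String :=
  ((PySem.List.enumerate array).foldl spaceyStep ([], "")).1

-- ===== PORT B =====
-- [''.join(array[:i+1]) for i in range(len(array))]
def spacey_alt (array : List String) : List String :=
  (PySem.List.pyRange 0 (array.length : Int) 1).map
    (fun i => PySem.Str.join "" (PySem.List.slice array none (some (i + 1))))

-- ===== PRECONDITION & SPEC =====
def Spec_spacey (array : List String) (out : List String) : Prop := out = spacey_alt array
instance (array : List String) (out : List String) : Decidable (Spec_spacey array out) := by unfold Spec_spacey; infer_instance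

-- ===== CLAIM (what is proved, stated in full; the proofs are below) =====
def Claim_equal_spacey : Prop := ∀ (array : List String), Dom_spacey array → Spec_spacey array (spacey array)

-- ===== LEMMAS AND PROOFS =====

-- proof-side helper: the running-prefix scan both programs compute
def spaceyGo (acc : String) : List String → List String
  | [] => []
  | x :: xs => (acc ++ x) :: spaceyGo (acc ++ x) xs

-- ''.join over a list of strings concatenates them
theorem inter_nil_sep (l : List (List Char)) : [].intercalate l = l.flatten := by
  induction l with
  | nil => simp [List.intercalate]
  | cons a t ih =>
    cases t with
    | nil => simp [List.intercalate]
    | cons b r =>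
      simp only [List.intercalate] at ih ⊢
      simp [List.intersperse] at ih ⊢
      exact ih

theorem join_empty_nil : PySem.Str.join "" ([] : List String) = "" := by decide

theorem join_empty_cons (x : String) (xs : List String) :
    PySem.Str.join "" (x :: xs) = x ++ PySem.Str.join "" xs := by
  simp [PySem.Str.join, PySem.Chars.join, inter_nil_sep, String.ofList_append,
    String.ofList_toList]

-- loop invariant for A: after the head step the state is (p ++ [s], _) at index p.length + 1
theorem spacey_loop (xs : List String) : ∀ (p : List String) (s novo : String),
    ((PySem.List.enumerate xs ((p.length : Int) + 1)).foldl spaceyStep (p ++ [s], novo)).1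
      = (p ++ [s]) ++ spaceyGo s xs := by
  induction xs with
  | nil => intro p s novo; simp [PySem.List.enumerate_nil, spaceyGo]
  | cons x xs ih =>
    intro p s novo
    rw [PySem.List.enumerate_cons]
    have hk : ((p.length : Int) + 1) ≠ 0 := by omega
    have hget : PySem.List.pyGet? (p ++ [s]) (((p.length : Int) + 1) - 1) = some s := by
      have : ((p.length : Int) + 1) - 1 = (p.length : Int) := by ring
      rw [this]
      simp
    simp only [List.foldl_cons, spaceyStep, hk, hget]
    have h2 : ((p ++ [s]).length : Int) + 1 = (p.length : Int) + 1 + 1 := by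
      simp
    have := ih (p ++ [s]) (s ++ x) (s ++ x)
    rw [h2] at this
    simp only [List.append_assoc] at this ⊢
    simpa [spaceyGo] using this

theorem spacey_eq_go (array : List String) : spacey array = spaceyGo "" array := by
  cases array with
  | nil => simp [spacey, spaceyGo, PySem.List.enumerate_nil]
  | cons v vs =>
    unfold spacey
    rw [PySem.List.enumerate_cons, List.foldl_cons]
    have h0 : spaceyStep ([], "") ((0 : Int), v) = ([v], "") := by
      simp [spaceyStep]
    rw [h0]
    have := spacey_loop vs ([] : List String) v ""
    simp only [List.length_nil, Nat.cast_zero, zero_add, List.nil_append] at this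
    rw [show (0:Int) + 1 = 1 by ring, this]
    simp [spaceyGo]

-- the scan, written as a map of prefix joins
theorem go_eq_map (xs : List String) : ∀ (acc : String),
    spaceyGo acc xs
      = (List.range xs.length).map (fun k => acc ++ PySem.Str.join "" (xs.take (k + 1))) := by
  induction xs with
  | nil => intro acc; simp [spaceyGo]
  | cons x xs ih =>
    intro acc
    simp only [spaceyGo, List.length_cons, List.range_succ_eq_map, List.map_cons, List.map_map]
    congr 1
    · simp [join_empty_cons, join_empty_nil]
    · rw [ih (acc ++ x)]
      apply List.map_congr_left
      intro k _
      simp [join_empty_cons, String.append_assoc]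

theorem alt_eq_map (xs : List String) :
    spacey_alt xs
      = (List.range xs.length).map (fun k => PySem.Str.join "" (xs.take (k + 1))) := by
  unfold spacey_alt
  rw [PySem.List.pyRange_zero_natCast, List.map_map]
  apply List.map_congr_left
  intro k _
  have : ((k : Int) + 1) = ((k + 1 : Nat) : Int) := by push_cast; ring
  simp only [Function.comp, this, PySem.List.slice_to_natCast]

theorem spacey_eq (array : List String) : spacey array = spacey_alt array := by
  rw [spacey_eq_go, go_eq_map, alt_eq_map]
  apply List.map_congr_left
  intro k _
  simp

-- ===== VERDICT (by name: the statement is the Claim_ definition above) =====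
theorem spacey_spec : Claim_equal_spacey := by
  intro array _
  unfold Spec_spacey
  exact spacey_eq array
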